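-- pv_equiv track=rewrite | github.com/sameeptandon/sail-car-log | process/preprocess_raw.py | sort_image_from_label_filenames
-- ===== SOURCE A (Python) =====
-- def sort_image_from_label_filenames(allImgs, suffix='.png'):
--     """
--     Takes a list of filenames that contain both images and their
--     corresponding labels and separates them into two distinct lists.
--     Assumes that all labels are named in the same way as their
--     corresponding images but with '_label' appended to the root of the
--     name.
--     """
--     imgs = []
--     labelImgs = []
--     label_suffix = '_label' + suffix
--     for name in allImgs:
--         if name.endswith(label_suffix):
--             labelImgs.append(name)
--         else:
--             imgs.append(name)
--
--     imgs.sort()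
--     labelImgs.sort()
--     if len(imgs) != len(labelImgs):
--         from warnings import warn
--         warn('Number of labels differs from number of images found')
--
--     return imgs, labelImgs
-- ===== SOURCE B (Python) =====
-- import bisect
--
-- def sort_image_from_label_filenames(allImgs, suffix='.png'):
--     """
--     Takes a list of filenames containing both images and their labels
--     and separates them into two sorted lists.  Online re-implementation:
--     each name is inserted directly at its sorted position in the proper
--     list as we go (bisect.insort), so no sort call is needed at the end.
--     """
--     label_suffix = '_label' + suffix
--     imgs = []
--     labelImgs = []
--     for name in allImgs:
--         bisect.insort(labelImgs if name.endswith(label_suffix) else imgs, name)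
--     return imgs, labelImgs
-- ===== Notes on version B (the rewrite author's own statement) =====
-- stated objective: alternative
-- what changed: B maintains both output lists sorted at all times, inserting each name at its sorted position with bisect.insort in a single online pass, instead of A's accumulate-then-sort-each-half; results match because a sorted arrangement of a multiset of strings is unique (A's length-mismatch warning side effect is dropped).
import Mathlib
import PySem

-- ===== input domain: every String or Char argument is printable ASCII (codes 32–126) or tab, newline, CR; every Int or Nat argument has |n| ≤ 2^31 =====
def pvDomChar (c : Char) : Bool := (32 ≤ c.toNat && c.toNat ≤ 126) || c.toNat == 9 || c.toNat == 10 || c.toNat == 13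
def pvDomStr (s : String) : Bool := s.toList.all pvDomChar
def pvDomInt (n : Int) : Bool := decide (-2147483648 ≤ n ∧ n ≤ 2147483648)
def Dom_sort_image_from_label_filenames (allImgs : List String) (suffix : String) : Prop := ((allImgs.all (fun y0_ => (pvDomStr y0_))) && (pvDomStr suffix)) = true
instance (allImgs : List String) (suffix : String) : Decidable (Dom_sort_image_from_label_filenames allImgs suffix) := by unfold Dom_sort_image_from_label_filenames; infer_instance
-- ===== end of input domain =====

-- B replaces A's accumulate-then-sort-each-half with a single online pass that bisect-inserts each
-- name at its sorted position in the proper list (objective: alternative); equivalence is about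
-- the RETURN value only — A's length-mismatch warning side effect is not reproduced.

-- ===== PORT A =====
def sort_image_from_label_filenames (allImgs : List String) (suffix : String) : List String × List String :=
  let label_suffix := "_label" ++ suffix
  let acc := allImgs.foldl
    (fun (st : List String × List String) name =>
      if PySem.Str.endswith name label_suffix then (st.1, st.2 ++ [name])
      else (st.1 ++ [name], st.2))
    ([], [])
  (PySem.List.sorted acc.1 (fun x => x) false, PySem.List.sorted acc.2 (fun x => x) false)

-- ===== PORT B =====
-- bisect.insort(target, name) of Source B: insert name at bisect_right(target, name)
def pvInsort (name : String) (l : List String) : List String :=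
  PySem.List.insert l ((PySem.List.bisectRight l name : ℕ) : ℤ) name

def sort_image_from_label_filenames_alt (allImgs : List String) (suffix : String) : List String × List String :=
  let label_suffix := "_label" ++ suffix
  allImgs.foldl
    (fun (st : List String × List String) name =>
      if PySem.Str.endswith name label_suffix then (st.1, pvInsort name st.2)
      else (pvInsort name st.1, st.2))
    ([], [])

-- ===== PRECONDITION & SPEC =====
def Spec_sort_image_from_label_filenames (allImgs : List String) (suffix : String) (out : List String × List String) : Prop := out = sort_image_from_label_filenames_alt allImgs suffix
instance (allImgs : List String) (suffix : String) (out : List String × List String) : Decidable (Spec_sort_image_from_label_filenames allImgs suffix out) := by unfold Spec_sort_image_from_label_filenames; infer_instance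

-- ===== CLAIM =====
def Claim_equal_sort_image_from_label_filenames : Prop := ∀ (allImgs : List String) (suffix : String), Dom_sort_image_from_label_filenames allImgs suffix → Spec_sort_image_from_label_filenames allImgs suffix (sort_image_from_label_filenames allImgs suffix)

-- ===== LEMMAS AND PROOFS =====

-- A's loop is a partition: it appends each non-label name to the first list and each label name to the second.
theorem pv_loop_filter (p : String → Bool) (xs i l : List String) :
    xs.foldl (fun (st : List String × List String) name =>
        if p name then (st.1, st.2 ++ [name]) else (st.1 ++ [name], st.2)) (i, l)
      = (i ++ xs.filter (fun n => !p n), l ++ xs.filter p) := by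
  induction xs generalizing i l with
  | nil => simp
  | cons x xs ih =>
    simp only [List.foldl_cons, List.filter_cons]
    by_cases h : p x <;> simp [h, ih]

-- bisect_right's binary-search loop: on a sorted list it lands after the elements ≤ x and before those > x
theorem pv_bisectLoop_spec (xs : List String) (x : String)
    (hsort : xs.Pairwise (· ≤ ·)) (fuel lo hi : ℕ)
    (hfuel : hi - lo ≤ fuel) (hlohi : lo ≤ hi) (hhi : hi ≤ xs.length)
    (hlo : ∀ j (hj : j < xs.length), j < lo → xs[j] ≤ x)
    (hhi' : ∀ j (hj : j < xs.length), hi ≤ j → x < xs[j]) :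
    (∀ j (hj : j < xs.length), j < PySem.List.bisectRightLoop xs x fuel lo hi → xs[j] ≤ x) ∧
    (∀ j (hj : j < xs.length), PySem.List.bisectRightLoop xs x fuel lo hi ≤ j → x < xs[j]) ∧
    PySem.List.bisectRightLoop xs x fuel lo hi ≤ xs.length := by
  have hmono := List.pairwise_iff_getElem.mp hsort
  induction fuel generalizing lo hi with
  | zero =>
    simp only [PySem.List.bisectRightLoop]
    have : lo = hi := by omega
    subst this
    exact ⟨hlo, fun j hj hje => hhi' j hj hje, by omega⟩
  | succ fuel ih =>
    simp only [PySem.List.bisectRightLoop]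
    by_cases hlt : lo < hi
    · simp only [hlt, if_true]
      have hmid : (lo + hi) / 2 < xs.length := by omega
      rw [List.getElem?_eq_getElem hmid]
      by_cases hxy : x < xs[(lo + hi) / 2]
      · simp only [hxy, if_true]
        refine ih lo ((lo + hi) / 2) (by omega) (by omega) (by omega) hlo ?_
        intro j hj hmj
        rcases eq_or_lt_of_le hmj with he | hl
        · subst he; exact hxy
        · exact lt_of_lt_of_le hxy (hmono _ j hmid hj hl)
      · simp only [hxy, if_false]
        refine ih ((lo + hi) / 2 + 1) hi (by omega) (by omega) hhi ?_ hhi'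
        intro j hj hjm
        rcases eq_or_lt_of_le (Nat.lt_succ_iff.mp hjm) with he | hl
        · subst he; exact le_of_not_gt hxy
        · exact le_trans (hmono j _ hj hmid hl) (le_of_not_gt hxy)
    · simp only [hlt, if_false]
      exact ⟨hlo, fun j hj hje => hhi' j hj (by omega), by omega⟩

theorem pv_bisectRight_spec (xs : List String) (x : String) (hsort : xs.Pairwise (· ≤ ·)) :
    (∀ j (hj : j < xs.length), j < PySem.List.bisectRight xs x → xs[j] ≤ x) ∧
    (∀ j (hj : j < xs.length), PySem.List.bisectRight xs x ≤ j → x < xs[j]) ∧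
    PySem.List.bisectRight xs x ≤ xs.length :=
  pv_bisectLoop_spec xs x hsort xs.length 0 xs.length (by omega) (by omega) (le_refl _)
    (by omega) (by intro j hj h; omega)

-- list.insert at a nonnegative in-range index is take/cons/drop
theorem pv_insert_eq (l : List String) (k : ℕ) (hk : k ≤ l.length) (x : String) :
    PySem.List.insert l (k : ℤ) x = l.take k ++ x :: l.drop k := by
  simp only [PySem.List.insert, PySem.List.sliceIndices]
  have h0 : ¬ ((k:ℤ) < 0) := by omega
  have h1 : ¬ ((1:ℤ) < 0) := by omega
  simp only [h0, h1, if_false]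
  have h2 : min (k:ℤ) (l.length:ℤ) = (k:ℤ) := by omega
  simp [h2]

-- pvInsort x l is a rearrangement of x :: l …
theorem pv_insort_perm (x : String) (l : List String) (hl : l.Pairwise (· ≤ ·)) :
    (pvInsort x l).Perm (x :: l) := by
  unfold pvInsort
  rw [pv_insert_eq l _ (pv_bisectRight_spec l x hl).2.2 x]
  exact List.perm_middle.trans (by rw [List.take_append_drop])

-- … and keeps the list sorted.
theorem pv_insort_pairwise (x : String) (l : List String)
    (hl : l.Pairwise (· ≤ ·)) : (pvInsort x l).Pairwise (· ≤ ·) := by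
  unfold pvInsort
  obtain ⟨hle, hgt, hlen⟩ := pv_bisectRight_spec l x hl
  rw [pv_insert_eq l _ hlen x]
  have hta : ∀ a ∈ l.take (PySem.List.bisectRight l x), a ≤ x := by
    intro a ha
    obtain ⟨i, hi, rfl⟩ := List.mem_iff_getElem.mp ha
    rw [List.getElem_take]
    exact hle i (by simp at hi; omega) (by simp at hi; omega)
  have hdr : ∀ b ∈ l.drop (PySem.List.bisectRight l x), x < b := by
    intro b hb
    obtain ⟨i, hi, rfl⟩ := List.mem_iff_getElem.mp hb
    rw [List.getElem_drop]
    exact hgt _ (by simp at hi; omega) (by omega)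
  refine List.pairwise_append.mpr ⟨hl.sublist (List.take_sublist _ _), ?_, ?_⟩
  · refine List.pairwise_cons.mpr ⟨fun b hb => le_of_lt (hdr b hb), hl.sublist (List.drop_sublist _ _)⟩
  · intro a ha b hb
    rcases List.mem_cons.mp hb with rfl | hb
    · exact hta a ha
    · exact le_trans (hta a ha) (le_of_lt (hdr b hb))

-- B's loop invariant: both accumulators stay sorted, and are rearrangements of acc ++ filtered prefix.
theorem pv_alt_inv (p : String → Bool) (xs i l : List String)
    (hi : i.Pairwise (· ≤ ·)) (hl : l.Pairwise (· ≤ ·)) :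
    ((xs.foldl (fun (st : List String × List String) name =>
        if p name then (st.1, pvInsort name st.2) else (pvInsort name st.1, st.2)) (i, l)).1.Perm
        (i ++ xs.filter (fun n => !p n)) ∧
      (xs.foldl (fun (st : List String × List String) name =>
        if p name then (st.1, pvInsort name st.2) else (pvInsort name st.1, st.2)) (i, l)).1.Pairwise (· ≤ ·)) ∧
    ((xs.foldl (fun (st : List String × List String) name =>
        if p name then (st.1, pvInsort name st.2) else (pvInsort name st.1, st.2)) (i, l)).2.Perm
        (l ++ xs.filter p) ∧
      (xs.foldl (fun (st : List String × List String) name =>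
        if p name then (st.1, pvInsort name st.2) else (pvInsort name st.1, st.2)) (i, l)).2.Pairwise (· ≤ ·)) := by
  induction xs generalizing i l with
  | nil => exact ⟨⟨by simp, hi⟩, by simp, hl⟩
  | cons x xs ih =>
    simp only [List.foldl_cons, List.filter_cons]
    by_cases h : p x
    · simp only [h, Bool.not_true, if_true]
      have hrec := ih i (pvInsort x l) hi (pv_insort_pairwise x l hl)
      refine ⟨⟨hrec.1.1, hrec.1.2⟩, ?_, hrec.2.2⟩
      exact hrec.2.1.trans (((pv_insort_perm x l hl).append_right _).trans List.perm_middle.symm)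
    · simp only [h, Bool.not_false, if_true]
      have hrec := ih (pvInsort x i) l (pv_insort_pairwise x i hi) hl
      refine ⟨⟨?_, hrec.1.2⟩, hrec.2.1, hrec.2.2⟩
      exact hrec.1.1.trans (((pv_insort_perm x i hi).append_right _).trans List.perm_middle.symm)

-- ===== VERDICT =====
theorem sort_image_from_label_filenames_spec : Claim_equal_sort_image_from_label_filenames := by
  intro allImgs suffix _
  unfold Spec_sort_image_from_label_filenames sort_image_from_label_filenames sort_image_from_label_filenames_alt
  have inv := pv_alt_inv (fun name => PySem.Str.endswith name ("_label" ++ suffix)) allImgs [] []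
    List.Pairwise.nil List.Pairwise.nil
  simp only [List.nil_append] at inv
  simp only [pv_loop_filter (fun name => PySem.Str.endswith name ("_label" ++ suffix)) allImgs [] [],
    List.nil_append]
  refine Prod.ext ?_ ?_
  · exact PySem.List.sorted_id_eq_of_perm_of_pairwise _ _ inv.1.1 inv.1.2
  · exact PySem.List.sorted_id_eq_of_perm_of_pairwise _ _ inv.2.1 inv.2.2
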